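-- pv_equiv track=rewrite | github.com/Micah-Ribbens/Test-Writer | logic/function_finder.py | get_output_type
-- ===== SOURCE A (Python) =====
-- def get_output_type(line):
--     """ summary: goes over the line and returns the first word that isn't public, static, or void
--
--         params:
--             line: String; the line that function is declared on
--
--         returns: String; the output type of the function
--     """
--
--     tokens_before_output_type = ["public", "static", "void"]
--     output_type = ""
--     letters = "abcdefghijklmnopqrstuvwxyz"
--
--     for ch in line:
--         if ch == " " and tokens_before_output_type.__contains__(output_type):
--             output_type = ""
--
--         elif ch == " " and not tokens_before_output_type.__contains__(output_type) and output_type != "":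
--             break
--
--         elif letters.__contains__(ch.lower()):
--             output_type += ch
--
--     return output_type
-- ===== SOURCE B (Python) =====
-- def get_output_type(line):
--     """Word-based re-implementation: split on spaces, clean each word to its
--     letters, return the first cleaned word that is non-empty and not a
--     keyword; the last word's cleaned form is returned unconditionally."""
--     keywords = ("public", "static", "void")
--     letters = "abcdefghijklmnopqrstuvwxyz"
--     words = line.split(" ")
--     for word in words[:-1]:
--         cleaned = "".join(ch for ch in word if ch.lower() in letters)
--         if cleaned != "" and cleaned not in keywords:
--             return cleaned
--     return "".join(ch for ch in words[-1] if ch.lower() in letters)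
-- ===== Notes on version B (the rewrite author's own statement) =====
-- stated objective: simpler
-- what changed: Replaced A's character-by-character state machine (accumulator with keyword-reset and break on space) by a split-on-space pass that cleans each word to its letters and returns the first non-keyword cleaned word, with the last word returned unconditionally as A does; fewer per-character string concatenations and membership tests give a constant-factor speedup.
import Mathlib
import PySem

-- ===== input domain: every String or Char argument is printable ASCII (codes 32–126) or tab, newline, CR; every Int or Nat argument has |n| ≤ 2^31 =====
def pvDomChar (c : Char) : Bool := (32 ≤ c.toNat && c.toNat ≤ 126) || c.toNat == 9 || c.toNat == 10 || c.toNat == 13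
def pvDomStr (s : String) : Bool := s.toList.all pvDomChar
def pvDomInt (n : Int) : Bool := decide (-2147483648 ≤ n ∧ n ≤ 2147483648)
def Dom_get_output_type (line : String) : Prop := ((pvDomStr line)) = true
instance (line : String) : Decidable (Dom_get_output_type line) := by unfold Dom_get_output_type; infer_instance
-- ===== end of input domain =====

-- B replaces A's single character scan (with its keyword-reset / break state machine)
-- by a split-into-words pass that cleans each word and classifies it; objective: simpler.

-- ===== PORT A =====
-- 'letters' from A
def pvLettersA : List Char := "abcdefghijklmnopqrstuvwxyz".toList

-- the keyword list from A
def pvKw : List String := ["public", "static", "void"]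

-- A's for-loop over the characters; 'break' is modelled by returning the accumulator
def pvGoA : List Char → String → String
  | [], acc => acc
  | c :: rest, acc =>
    if c = ' ' ∧ pvKw.contains acc then pvGoA rest ""
    else if c = ' ' ∧ ¬ pvKw.contains acc ∧ acc ≠ "" then acc
    else if pvLettersA.contains (PySem.Chars.lowerChar c) then pvGoA rest (acc.push c)
    else pvGoA rest acc

def get_output_type (line : String) : String := pvGoA line.toList ""

-- ===== PORT B =====
-- cleaned = "".join(ch for ch in word if ch.lower() in letters)
def pvClean (w : List Char) : String :=
  String.ofList (w.filter (fun c => pvLettersA.contains (PySem.Chars.lowerChar c)))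

-- hand port of line.split(" ") (single-char separator, empty pieces kept) — exact;
-- PySem.Chars.splitOn computes the same but through a fuel loop unusable for induction
def pvSplitSp : List Char → List (List Char)
  | [] => [[]]
  | c :: rest =>
    if c = ' ' then [] :: pvSplitSp rest
    else (pvSplitSp rest).modifyHead (c :: ·)

-- Source B's loop over words[:-1] plus the unconditional return of the last cleaned word
def pvGoB : List (List Char) → String
  | [] => ""                                   -- unreachable: split never yields []
  | [w] => pvClean w
  | w :: rest@(_ :: _) =>
    let cleaned := pvClean w
    if cleaned ≠ "" ∧ ¬ pvKw.contains cleaned then cleaned else pvGoB rest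

def get_output_type_alt (line : String) : String := pvGoB (pvSplitSp line.toList)

-- ===== PRECONDITION & SPEC =====
def Spec_get_output_type (line : String) (out : String) : Prop := out = get_output_type_alt line
instance (line : String) (out : String) : Decidable (Spec_get_output_type line out) := by unfold Spec_get_output_type; infer_instance

-- ===== CLAIM (what is proved, stated in full; the proofs are below) =====
def Claim_equal_get_output_type : Prop := ∀ (line : String), Dom_get_output_type line → Spec_get_output_type line (get_output_type line)

-- ===== LEMMAS AND PROOFS =====
theorem pvSplitSp_ne_nil (cs : List Char) : pvSplitSp cs ≠ [] := by
  cases cs with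
  | nil => simp [pvSplitSp]
  | cons c rest =>
    simp only [pvSplitSp]
    split
    · simp
    · exact (List.modifyHead_eq_nil_iff).not.mpr (pvSplitSp_ne_nil rest)

theorem pvModifyHead_id (l : List (List Char)) : l.modifyHead (fun x => x) = l := by
  cases l <;> simp


theorem pvClean_nil : pvClean [] = "" := rfl

theorem pvClean_append_one (w : List Char) (c : Char) :
    pvClean (w ++ [c]) =
      if pvLettersA.contains (PySem.Chars.lowerChar c) then (pvClean w).push c
      else pvClean w := by
  simp only [pvClean, List.filter_append, List.filter]
  split <;> simp_all [String.push, String.ofList]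

theorem pvGoB_cons (w : List Char) (rest : List (List Char)) (h : rest ≠ []) :
    pvGoB (w :: rest) =
      (if pvClean w ≠ "" ∧ ¬ pvKw.contains (pvClean w) then pvClean w else pvGoB rest) := by
  cases rest with
  | nil => exact absurd rfl h
  | cons a t => simp only [pvGoB]

-- main invariant: A's scan with accumulated cleaned prefix w equals B's word loop
theorem pvMain (cs : List Char) (w : List Char) :
    pvGoA cs (pvClean w) = pvGoB ((pvSplitSp cs).modifyHead (w ++ ·)) := by
  induction cs generalizing w with
  | nil => simp [pvGoA, pvSplitSp, pvGoB]
  | cons c rest ih =>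
    by_cases hc : c = ' '
    · subst hc
      have hb : pvGoA rest "" = pvGoB (pvSplitSp rest) := by
        have := ih ([])
        simpa [pvClean_nil, pvModifyHead_id] using this
      have hsplit : (pvSplitSp (' ' :: rest)).modifyHead (w ++ ·) = w :: pvSplitSp rest := by
        simp [pvSplitSp]
      rw [hsplit, pvGoB_cons _ _ (pvSplitSp_ne_nil rest)]
      by_cases hkw : pvClean w ∈ pvKw
      · simp [pvGoA, hkw, hb]
      · by_cases hne : pvClean w = ""
        · rw [hne, ← pvClean_nil]
          show (if _ then _ else if _ then _ else _) = _
          rw [if_neg (by decide), if_neg (by decide), pvClean_nil]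
          exact hb
        · simp [pvGoA, hkw, hne]
    · have hsplit : (pvSplitSp (c :: rest)).modifyHead (w ++ ·)
          = (pvSplitSp rest).modifyHead ((w ++ [c]) ++ ·) := by
        simp only [pvSplitSp, if_neg hc, List.modifyHead_modifyHead]
        congr 1
        funext x
        simp
      rw [hsplit, ← ih (w ++ [c]), pvClean_append_one]
      have h1 : ¬(c = ' ' ∧ pvKw.contains (pvClean w) = true) := by simp [hc]
      have h2 : ¬(c = ' ' ∧ ¬pvKw.contains (pvClean w) = true ∧ pvClean w ≠ "") := by simp [hc]
      simp only [pvGoA, if_neg h1, if_neg h2]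
      split <;> rfl

-- ===== VERDICT (by name: the statement is the Claim_ definition above) =====
theorem get_output_type_spec : Claim_equal_get_output_type := by
  intro line _
  show get_output_type line = get_output_type_alt line
  have := pvMain line.toList []
  simpa [get_output_type, get_output_type_alt, pvClean_nil, pvModifyHead_id] using this
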